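-- pv_equiv track=rewrite | github.com/xpyczl00/VUT-FIT | 2SEM/ISJ/isj_proj3_xpyczl00.py | to_pilot_alpha
-- ===== SOURCE A (Python) =====
-- def to_pilot_alpha(word):
--     """Returns a list of pilot alpha codes corresponding to the input word
--
--     >>> to_pilot_alpha('Smrz')
--     ['Sierra', 'Mike', 'Romeo', 'Zulu']
--     """
--
--     pilot_alpha = ['Alfa', 'Bravo', 'Charlie', 'Delta', 'Echo', 'Foxtrot',
--         'Golf', 'Hotel', 'India', 'Juliett', 'Kilo', 'Lima', 'Mike',
--         'November', 'Oscar', 'Papa', 'Quebec', 'Romeo', 'Sierra', 'Tango',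
--         'Uniform', 'Victor', 'Whiskey', 'Xray', 'Yankee', 'Zulu']
--
--     pilot_alpha_list = []
--
--     for letter in word:
--         for code in pilot_alpha:
--             if code[0].lower()==letter or code[0]==letter:
--                 pilot_alpha_list.append(code)
--
--
--     return pilot_alpha_list
-- ===== SOURCE B (Python) =====
-- def to_pilot_alpha(word):
--     """Returns a list of pilot alpha codes corresponding to the input word"""
--     pilot_alpha = ['Alfa', 'Bravo', 'Charlie', 'Delta', 'Echo', 'Foxtrot',
--         'Golf', 'Hotel', 'India', 'Juliett', 'Kilo', 'Lima', 'Mike',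
--         'November', 'Oscar', 'Papa', 'Quebec', 'Romeo', 'Sierra', 'Tango',
--         'Uniform', 'Victor', 'Whiskey', 'Xray', 'Yankee', 'Zulu']
--     return [pilot_alpha[ord(c.lower()) - 97] for c in word
--             if 'a' <= c.lower() <= 'z']
-- ===== Notes on version B (the rewrite author's own statement) =====
-- stated objective: faster
-- what changed: B replaces A's inner linear scan over all 26 codes per character with a single arithmetic table index ord(c.lower())-97 guarded by a letter test, as a filter-map comprehension.
import Mathlib
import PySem

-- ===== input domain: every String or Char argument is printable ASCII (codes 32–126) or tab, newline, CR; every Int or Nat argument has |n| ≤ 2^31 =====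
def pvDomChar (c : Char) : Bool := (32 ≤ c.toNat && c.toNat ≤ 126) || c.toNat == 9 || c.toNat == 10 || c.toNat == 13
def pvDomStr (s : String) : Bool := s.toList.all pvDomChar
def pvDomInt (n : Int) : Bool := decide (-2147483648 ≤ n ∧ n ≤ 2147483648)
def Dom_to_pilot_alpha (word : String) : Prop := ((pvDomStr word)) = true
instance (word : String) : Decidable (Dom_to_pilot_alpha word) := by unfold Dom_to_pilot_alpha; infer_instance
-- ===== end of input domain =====

-- ===== PORT A =====
-- B replaces A's inner 26-element scan per character by a direct arithmetic table index (constant-factor speedup).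
-- the shared literal table both Pythons declare
def natoCodes : List String := ["Alfa", "Bravo", "Charlie", "Delta", "Echo", "Foxtrot",
  "Golf", "Hotel", "India", "Juliett", "Kilo", "Lima", "Mike",
  "November", "Oscar", "Papa", "Quebec", "Romeo", "Sierra", "Tango",
  "Uniform", "Victor", "Whiskey", "Xray", "Yankee", "Zulu"]

-- per-char port of Python's str.lower (exact on the ASCII domain Dom_to_pilot_alpha admits)
def pyLowerChar (c : Char) : Char :=
  if 'A' ≤ c ∧ c ≤ 'Z' then Char.ofNat (c.toNat + 32) else c

-- literal transliteration of A: for each letter, scan all 26 codes and append each match.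
-- code[0] on the nonempty literal codes is ported as code.toList.headD ' '.
def to_pilot_alpha (word : String) : List String :=
  word.toList.foldl (fun acc letter =>
    natoCodes.foldl (fun acc2 code =>
      let c0 := code.toList.headD ' '
      if pyLowerChar c0 == letter || c0 == letter then acc2 ++ [code] else acc2) acc) []

-- ===== PORT B =====
-- transliteration of B's comprehension: filter the letters, map each to its table entry by index.
-- pilot_alpha[ord(c.lower()) - 97] is in range whenever the guard holds; ported with pyGetD.
def to_pilot_alpha_alt (word : String) : List String :=
  (word.toList.filter (fun c => 'a' ≤ pyLowerChar c ∧ pyLowerChar c ≤ 'z')).map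
    (fun c => PySem.List.pyGetD natoCodes (((pyLowerChar c).toNat : Int) - 97) "")

-- ===== PRECONDITION & SPEC =====
def Spec_to_pilot_alpha (word : String) (out : List String) : Prop := out = to_pilot_alpha_alt word
instance (word : String) (out : List String) : Decidable (Spec_to_pilot_alpha word out) := by unfold Spec_to_pilot_alpha; infer_instance

-- ===== CLAIM (what is proved, stated in full; the proofs are below) =====
def Claim_equal_to_pilot_alpha : Prop := ∀ (word : String), Dom_to_pilot_alpha word → Spec_to_pilot_alpha word (to_pilot_alpha word)


-- ===== LEMMAS AND PROOFS =====

-- what A's inner loop appends for one letter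
def stepA (letter : Char) : List String :=
  natoCodes.filter (fun code =>
    pyLowerChar (code.toList.headD ' ') == letter || code.toList.headD ' ' == letter)

-- what B produces for one letter
def stepB (letter : Char) : List String :=
  if 'a' ≤ pyLowerChar letter ∧ pyLowerChar letter ≤ 'z' then
    [PySem.List.pyGetD natoCodes (((pyLowerChar letter).toNat : Int) - 97) ""] else []

lemma stepA_accum (acc : List String) (letter : Char) :
    natoCodes.foldl (fun acc2 code =>
      let c0 := code.toList.headD ' '
      if pyLowerChar c0 == letter || c0 == letter then acc2 ++ [code] else acc2) acc
      = acc ++ stepA letter :=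
  PySem.List.foldl_append_if_eq_filter (fun code : String =>
    pyLowerChar (code.toList.headD ' ') == letter || code.toList.headD ' ' == letter)
    natoCodes acc

set_option maxRecDepth 40000 in
set_option maxHeartbeats 2000000 in
lemma step_eq_of_lt (letter : Char) (h : letter.toNat < 128) : stepA letter = stepB letter := by
  have hall : ∀ n ∈ List.range 128, stepA (Char.ofNat n) = stepB (Char.ofNat n) := by decide
  have := hall letter.toNat (List.mem_range.mpr h)
  rwa [Char.ofNat_toNat] at this

lemma foldl_stepA (cs : List Char) (acc : List String) :
    cs.foldl (fun acc letter =>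
      natoCodes.foldl (fun acc2 code =>
        let c0 := code.toList.headD ' '
        if pyLowerChar c0 == letter || c0 == letter then acc2 ++ [code] else acc2) acc) acc
      = acc ++ cs.flatMap stepA := by
  induction cs generalizing acc with
  | nil => simp
  | cons c cs ih =>
    rw [List.foldl_cons, stepA_accum, ih, List.flatMap_cons, List.append_assoc]

lemma filter_map_eq_flatMap_stepB (cs : List Char) :
    (cs.filter (fun c => 'a' ≤ pyLowerChar c ∧ pyLowerChar c ≤ 'z')).map
      (fun c => PySem.List.pyGetD natoCodes (((pyLowerChar c).toNat : Int) - 97) "")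
      = cs.flatMap stepB := by
  induction cs with
  | nil => rfl
  | cons c cs ih =>
    rw [List.filter_cons, List.flatMap_cons]
    by_cases h : 'a' ≤ pyLowerChar c ∧ pyLowerChar c ≤ 'z'
    · rw [if_pos (decide_eq_true h), List.map_cons, ih]
      simp [stepB, h]
    · rw [if_neg (by simpa using h), ih]
      simp [stepB, h]

lemma flatMap_step_congr (cs : List Char) (hall : ∀ c ∈ cs, pvDomChar c = true) :
    cs.flatMap stepA = cs.flatMap stepB := by
  induction cs with
  | nil => rfl
  | cons c cs ih =>
    have hc : c.toNat < 128 := by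
      have := hall c (List.mem_cons_self ..)
      simp [pvDomChar] at this
      omega
    rw [List.flatMap_cons, List.flatMap_cons, step_eq_of_lt c hc,
      ih (fun x hx => hall x (List.mem_cons_of_mem _ hx))]

-- ===== VERDICT (by name: the statement is the Claim_ definition above) =====
theorem to_pilot_alpha_spec : Claim_equal_to_pilot_alpha := by
  intro word hdom
  unfold Spec_to_pilot_alpha to_pilot_alpha to_pilot_alpha_alt
  rw [foldl_stepA, filter_map_eq_flatMap_stepB, List.nil_append]
  exact (flatMap_step_congr word.toList
    (by simpa [Dom_to_pilot_alpha, pvDomStr, List.all_eq_true] using hdom))
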